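-- pv_equiv track=rewrite | github.com/pan915/MedTS | src/modeling_treqs.py | get_token_indices
-- ===== SOURCE A (Python) =====
-- def get_token_indices(token, index_to_token):
--     """ Maps from a gold token (string) to a list of indices.
--
--     Inputs:
--         token (string): String to look up.
--         index_to_token (list of tokens): Ordered list of tokens.
--
--     Returns:
--         list of int, representing the indices of the token in the probability
--             distribution.
--     """
--     if token in index_to_token:
--         if len(set(index_to_token)) == len(index_to_token):  # no duplicates
--             return [index_to_token.index(token)]
--         else:
--             indices = []
--             for index, other_token in enumerate(index_to_token):
--                 if token == other_token:
--                     indices.append(index)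
--             assert len(indices) == len(set(indices))
--             return indices
--     else:
--         return None
-- ===== SOURCE B (Python) =====
-- def get_token_indices(token, index_to_token):
--     # Build an inverted index mapping every token to all of its positions in
--     # one pass, then answer by a single dictionary lookup (None if absent).
--     positions = {}
--     for i, t in enumerate(index_to_token):
--         positions.setdefault(t, []).append(i)
--     return positions.get(token)
-- ===== Notes on version B (the rewrite author's own statement) =====
-- stated objective: alternative
-- what changed: Replaced A's multi-pass scan structure (membership test, set()-based duplicate check, .index() fast path, enumerate loop) with an inverted index: one pass groups every token's positions into a dict, and the answer is a single dict lookup returning None when the token is absent.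
import Mathlib
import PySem

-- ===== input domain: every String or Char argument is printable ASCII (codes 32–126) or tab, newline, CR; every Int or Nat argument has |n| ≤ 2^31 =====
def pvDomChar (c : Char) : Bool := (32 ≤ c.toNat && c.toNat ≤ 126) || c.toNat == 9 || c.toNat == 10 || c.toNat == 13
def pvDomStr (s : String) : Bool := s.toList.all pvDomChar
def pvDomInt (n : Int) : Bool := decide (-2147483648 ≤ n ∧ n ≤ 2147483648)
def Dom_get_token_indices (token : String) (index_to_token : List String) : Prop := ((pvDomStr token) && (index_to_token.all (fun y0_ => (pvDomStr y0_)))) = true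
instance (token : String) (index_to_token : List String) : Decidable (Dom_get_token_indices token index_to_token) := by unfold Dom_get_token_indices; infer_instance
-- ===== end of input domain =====

-- B replaces A's multi-pass scan structure with an inverted index: one grouping pass builds a
-- dict token -> all positions, and the answer is a single dict lookup (None for absent tokens).

-- ===== PORT A =====
def get_token_indices (token : String) (index_to_token : List String) : Option (List Int) :=
  if token ∈ index_to_token then
    if (PySem.Set.ofList index_to_token).length = index_to_token.length then
      -- Python list.index: guarded by the membership test above, so never raises here
      match PySem.List.index? index_to_token token with
      | some i => some [(i : Int)]
      | none => none
    else
      some ((PySem.List.enumerate index_to_token 0).foldl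
        (fun acc p => if token == p.2 then acc ++ [p.1] else acc) [])
  else
    none

-- ===== PORT B =====
-- positions.setdefault(t, []).append(i) is exactly positions[t] = positions.get(t, []) + [i],
-- i.e. Dict.modify t [] (· ++ [i]) (new keys append, as in Python).
def get_token_indices_alt (token : String) (index_to_token : List String) : Option (List Int) :=
  let positions := (PySem.List.enumerate index_to_token 0).foldl
    (fun d p => d.modify p.2 ([] : List Int) (fun l => l ++ [p.1])) PySem.Dict.empty
  positions.get? token

-- ===== PRECONDITION & SPEC =====
def Spec_get_token_indices (token : String) (index_to_token : List String) (out : Option (List Int)) : Prop := out = get_token_indices_alt token index_to_token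
instance (token : String) (index_to_token : List String) (out : Option (List Int)) : Decidable (Spec_get_token_indices token index_to_token out) := by unfold Spec_get_token_indices; infer_instance

-- ===== CLAIM (what is proved, stated in full; the proofs are below) =====
def Claim_equal_get_token_indices : Prop := ∀ (token : String) (index_to_token : List String), Dom_get_token_indices token index_to_token → Spec_get_token_indices token index_to_token (get_token_indices token index_to_token)

-- ===== LEMMAS AND PROOFS =====

-- the list of indices of token in xs, starting positions at s
def pvMatches (token : String) (xs : List String) (s : Int) : List Int :=
  (PySem.List.enumerate xs s).filterMap (fun p => if p.2 == token then some p.1 else none)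

theorem pvMatches_cons (token x : String) (xs : List String) (s : Int) :
    pvMatches token (x :: xs) s =
      (if x == token then [s] else []) ++ pvMatches token xs (s + 1) := by
  simp only [pvMatches, PySem.List.enumerate_cons, List.filterMap_cons]
  by_cases h : x = token <;> simp [h]

theorem pvMatches_eq_nil_of_not_mem (token : String) (xs : List String) (s : Int)
    (h : token ∉ xs) : pvMatches token xs s = [] := by
  induction xs generalizing s with
  | nil => rfl
  | cons x xs ih =>
    rw [pvMatches_cons]
    have hx : x ≠ token := fun he => h (he ▸ List.mem_cons_self)
    simp [hx, ih (s + 1) (fun hm => h (List.mem_cons_of_mem _ hm))]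

theorem pvMatches_of_nodup (token : String) (xs : List String) (s : Int) (k : Nat)
    (hnd : xs.Nodup) (hidx : PySem.List.index? xs token = some k) :
    pvMatches token xs s = [s + (k : Int)] := by
  induction xs generalizing s k with
  | nil => simp [PySem.List.index?] at hidx
  | cons x xs ih =>
    rw [pvMatches_cons]
    by_cases hx : x = token
    · subst hx
      rw [PySem.List.index?_cons_self] at hidx
      obtain rfl : k = 0 := by simpa using hidx.symm
      have hnm : x ∉ xs := (List.nodup_cons.mp hnd).1
      simp [pvMatches_eq_nil_of_not_mem x xs (s + 1) hnm]
    · rw [PySem.List.index?_cons_of_ne xs hx] at hidx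
      rcases Option.map_eq_some_iff.mp hidx with ⟨k', hk', rfl⟩
      have := ih (s + 1) k' (List.nodup_cons.mp hnd).2 hk'
      rw [if_neg (by simp [hx]), List.nil_append, this]
      congr 1
      push_cast
      ring

-- dropping an element that occurs in a list shortens its filter residue strictly
theorem pv_filter_ne_length_lt {l : List String} {x : String} (hx : x ∈ l) :
    (l.filter (fun y => !(y == x))).length < l.length := by
  induction l with
  | nil => simp at hx
  | cons a l ih =>
    by_cases ha : a = x
    · subst ha
      simp only [List.filter_cons, beq_self_eq_true, Bool.not_true, List.length_cons]
      exact Nat.lt_succ_of_le (List.length_filter_le _ _)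
    · have hm : x ∈ l := by
        rcases List.mem_cons.mp hx with h' | h'
        · exact absurd h'.symm ha
        · exact h'
      simp only [List.filter_cons, List.length_cons]
      have hb : (!(a == x)) = true := by simp [ha]
      rw [hb]
      simpa using Nat.succ_lt_succ (ih hm)

-- a set as long as its source list means the source had no duplicates
theorem pv_nodup_of_ofList_length (xs : List String)
    (h : (PySem.Set.ofList xs).length = xs.length) : xs.Nodup := by
  induction xs with
  | nil => simp
  | cons x xs ih =>
    rw [PySem.Set.ofList_cons] at h
    simp only [List.length_cons] at h
    have hle : (PySem.Set.discard (PySem.Set.ofList xs) x).length ≤ (PySem.Set.ofList xs).length :=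
      List.length_filter_le _ _
    have hle2 := PySem.Set.length_ofList_le (xs := xs)
    refine List.nodup_cons.mpr ⟨?_, ih (by omega)⟩
    intro hmem
    have hx : x ∈ PySem.Set.ofList xs := (PySem.Set.mem_ofList xs x).mpr hmem
    have hlt : (PySem.Set.discard (PySem.Set.ofList xs) x).length < (PySem.Set.ofList xs).length :=
      pv_filter_ne_length_lt hx
    omega

-- A's duplicate-branch loop computes pvMatches
theorem pvFoldl_eq_matches (token : String) (xs : List String) :
    (PySem.List.enumerate xs 0).foldl
      (fun acc p => if token == p.2 then acc ++ [p.1] else acc) [] =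
    pvMatches token xs 0 := by
  rw [PySem.List.foldl_append_if (fun p => token == p.2) (fun p : Int × String => p.1)]
  simp only [List.nil_append, pvMatches]
  induction (PySem.List.enumerate xs 0) with
  | nil => rfl
  | cons p ps ih =>
    simp only [List.filter_cons, List.filterMap_cons]
    by_cases h : p.2 = token
    · simp [h, ih]
    · have h1 : (token == p.2) = false := beq_eq_false_iff_ne.mpr (Ne.symm h)
      have h2 : (p.2 == token) = false := beq_eq_false_iff_ne.mpr h
      simp [h1, h2, ih]

-- the grouping dict of B, looked up at token with default [], is pvMatches
theorem pvDict_getD (token : String) (xs : List String) (s : Int) :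
    ((PySem.List.enumerate xs s).foldl
      (fun d p => d.modify p.2 ([] : List Int) (fun l => l ++ [p.1])) PySem.Dict.empty).getD
      token [] = pvMatches token xs s := by
  have h := PySem.Dict.getD_foldl_modify_append
    (l := (PySem.List.enumerate xs s).map (fun p => (p.2, p.1)))
    (d := (PySem.Dict.empty : PySem.Dict String (List Int))) (c := token)
  rw [List.foldl_map] at h
  simp only at h
  rw [h, PySem.Dict.getD_empty, List.nil_append, pvMatches]
  induction (PySem.List.enumerate xs s) with
  | nil => rfl
  | cons p ps ih =>
    simp only [List.map_cons, List.filter_cons, List.filterMap_cons]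
    by_cases hp : p.2 = token
    · simp [hp, ih]
    · have hb : (p.2 == token) = false := beq_eq_false_iff_ne.mpr hp
      simp [hb, ih]

-- B's dict contains exactly the tokens of xs as keys
theorem pvDict_keys (xs : List String) (s : Int) :
    ((PySem.List.enumerate xs s).foldl
      (fun d p => d.modify p.2 ([] : List Int) (fun l => l ++ [p.1])) PySem.Dict.empty).keys
      = PySem.Set.ofList xs := by
  have h := PySem.Dict.keys_foldl_modify_key
    (l := PySem.List.enumerate xs s) (key := fun p : Int × String => p.2)
    (d0 := ([] : List Int)) (f := fun d p => fun l => l ++ [p.1])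
    (d := (PySem.Dict.empty : PySem.Dict String (List Int)))
  rw [h, PySem.Dict.keys_empty, PySem.Set.update_nil_left, PySem.List.map_snd_enumerate]

-- B's result, characterised by membership and pvMatches
theorem pvAlt_eq (token : String) (xs : List String) :
    get_token_indices_alt token xs =
      if token ∈ xs then some (pvMatches token xs 0) else none := by
  unfold get_token_indices_alt
  set d := (PySem.List.enumerate xs 0).foldl
    (fun d p => d.modify p.2 ([] : List Int) (fun l => l ++ [p.1])) PySem.Dict.empty with hd
  by_cases hm : token ∈ xs
  · rw [if_pos hm]
    have hk : token ∈ d.keys := by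
      rw [hd, pvDict_keys]
      exact (PySem.Set.mem_ofList xs token).mpr hm
    have hs : (d.get? token).isSome := by
      rcases Option.eq_none_or_eq_some (d.get? token) with h | ⟨v, h⟩
      · exact absurd ((PySem.Dict.get?_eq_none_iff_not_mem_keys d token).mp h) (not_not_intro hk)
      · simp [h]
    rcases Option.isSome_iff_exists.mp hs with ⟨v, hv⟩
    have : d.getD token [] = v := PySem.Dict.getD_of_get?_eq_some d [] hv
    rw [hv, ← this, pvDict_getD]
  · rw [if_neg hm]
    apply (PySem.Dict.get?_eq_none_iff_not_mem_keys d token).mpr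
    rw [hd, pvDict_keys]
    exact fun hk => hm ((PySem.Set.mem_ofList xs token).mp hk)

-- ===== VERDICT (by name: the statement is the Claim_ definition above) =====
theorem get_token_indices_spec : Claim_equal_get_token_indices := by
  unfold Claim_equal_get_token_indices
  intro token xs _
  unfold Spec_get_token_indices
  rw [pvAlt_eq]
  unfold get_token_indices
  by_cases hm : token ∈ xs
  · rw [if_pos hm, if_pos hm]
    by_cases hnd : (PySem.Set.ofList xs).length = xs.length
    · rw [if_pos hnd]
      obtain ⟨k, hk⟩ := Option.isSome_iff_exists.mp
        ((PySem.List.index?_isSome_iff (xs := xs) (v := token)).mpr hm)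
      rw [hk, pvMatches_of_nodup token xs 0 k (pv_nodup_of_ofList_length xs hnd) hk]
      simp
    · rw [if_neg hnd, pvFoldl_eq_matches]
  · rw [if_neg hm, if_neg hm]
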